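-- pv_equiv track=rewrite | github.com/SuBhAm6G/Data-Science-Learning | String Specialisation/2_Indexing, Slicing, and Access Semantics/2.3 String Reversal Techniques.py | custom_rev
-- ===== SOURCE A (Python) =====
-- def custom_rev(s):
--     even=list(s[0::2][::-1])
--     lst=list(s)
--     j=0
--     for i in range(len(lst)):
--         if(i%2==0):
--             lst[i]=even[j]
--             j+=1
--     new_s="".join(lst)
--     return new_s
-- ===== SOURCE B (Python) =====
-- def custom_rev(s):
--     n = len(s)
--     last = n - 1 if n % 2 == 1 else n - 2  # largest even index
--     return ''.join(s[last - i] if i % 2 == 0 else s[i] for i in range(n))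
-- ===== Notes on version B (the rewrite author's own statement) =====
-- stated objective: simpler
-- what changed: B computes each output character directly from a closed-form index (s[last-i] for even i, s[i] for odd i, last = largest even index) in a single join over range(n), instead of A's building a reversed even-index sublist and copying it back over the string with a separate counter.
import Mathlib
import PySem

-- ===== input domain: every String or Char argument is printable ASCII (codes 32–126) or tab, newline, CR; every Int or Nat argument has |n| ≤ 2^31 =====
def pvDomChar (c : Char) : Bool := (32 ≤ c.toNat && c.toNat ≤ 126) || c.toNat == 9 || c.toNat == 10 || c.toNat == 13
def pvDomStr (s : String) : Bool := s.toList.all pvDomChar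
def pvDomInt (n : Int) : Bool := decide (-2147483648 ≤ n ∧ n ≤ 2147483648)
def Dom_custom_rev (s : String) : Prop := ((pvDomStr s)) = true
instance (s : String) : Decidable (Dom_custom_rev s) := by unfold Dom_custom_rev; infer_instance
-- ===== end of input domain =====

-- B replaces A's reversed-sublist-plus-counter loop by a single pass computing each
-- output character directly from a closed-form index (objective: simpler).

-- ===== PORT A =====
-- even = list(s[0::2][::-1]); lst = list(s); for i in range(len(lst)): if i%2==0: lst[i]=even[j]; j+=1
-- slice? never returns none for a nonzero step, and even[j] is always in range
-- (j counts even indices seen so far), so the port reads both through getD.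
def custom_rev (s : String) : String :=
  let even : List Char :=
    (PySem.List.slice? ((PySem.List.slice? s.toList (some 0) none 2).getD []) none none (-1)).getD []
  let lst : List Char := s.toList
  let res : List Char × Int :=
    (PySem.List.pyRange 0 (lst.length : Int) 1).foldl
      (fun (st : List Char × Int) (i : Int) =>
        if PySem.Int.mod i 2 == 0 then
          (st.1.set i.toNat ((PySem.List.pyGet? even st.2).getD ' '), st.2 + 1)
        else st)
      (lst, 0)
  String.ofList res.1

-- ===== PORT B =====
-- n = len(s); last = n-1 if n%2==1 else n-2; join over range(n) of s[last-i] (even i) / s[i] (odd i).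
-- s[last-i] and s[i] are always in range in Source B, so the port reads them through getD.
def custom_rev_alt (s : String) : String :=
  let l : List Char := s.toList
  let n : Int := l.length
  let last : Int := if PySem.Int.mod n 2 == 1 then n - 1 else n - 2
  String.ofList
    ((PySem.List.pyRange 0 n 1).map (fun (i : Int) =>
      if PySem.Int.mod i 2 == 0 then (PySem.List.pyGet? l (last - i)).getD ' '
      else (PySem.List.pyGet? l i).getD ' '))

-- ===== PRECONDITION & SPEC =====
def Spec_custom_rev (s : String) (out : String) : Prop := out = custom_rev_alt s
instance (s : String) (out : String) : Decidable (Spec_custom_rev s out) := by unfold Spec_custom_rev; infer_instance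

-- ===== CLAIM (what is proved, stated in full; the proofs are below) =====
def Claim_equal_custom_rev : Prop := ∀ (s : String), Dom_custom_rev s → Spec_custom_rev s (custom_rev s)

-- ===== LEMMAS AND PROOFS =====

-- the characters of l at even indices, as A's step-2 slice produces them
def pvE (l : List Char) : List Char :=
  (List.range ((l.length + 1) / 2)).map (fun k => l.getD (2 * k) ' ')

lemma pvE_length (l : List Char) : (pvE l).length = (l.length + 1) / 2 := by
  simp [pvE]

lemma pvFilterMap_range_eq_map {α : Type} (m : Nat) (f : Nat → Option α) (g : Nat → α)
    (h : ∀ k, k < m → f k = some (g k)) :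
    List.filterMap f (List.range m) = (List.range m).map g := by
  induction m with
  | zero => simp
  | succ m ih =>
      rw [List.range_succ, List.filterMap_append, List.map_append,
        ih (fun k hk => h k (by omega))]
      simp [h m (by omega)]

-- A's first slice, s[0::2], is exactly pvE
lemma slice_zero_two (l : List Char) :
    PySem.List.slice? l (some 0) none 2 = some (pvE l) := by
  have h2 : (2 : Int) ≠ 0 := by norm_num
  simp only [PySem.List.slice?, PySem.List.sliceIndices, if_neg h2]
  norm_num
  rw [show (if 0 < l.length then (((l.length : Int) + 2 - 1) / 2).toNat else 0)
      = (l.length + 1) / 2 from by split_ifs <;> omega]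
  rw [pvFilterMap_range_eq_map _ _ (fun k => l.getD (2 * k) ' ')]
  · rfl
  · intro k hk
    have hlt : 2 * k < l.length := by omega
    have htn : ((2 : Int) * (k : Int)).toNat = 2 * k := by omega
    rw [htn, List.getElem?_eq_getElem hlt, List.getD_eq_getElem l ' ' hlt]

-- the result list of A after the first t loop iterations, described pointwise
def pvA (l : List Char) (t : Nat) : List Char :=
  (List.range l.length).map (fun p =>
    if p % 2 = 0 ∧ p < t then (pvE l).reverse.getD (p / 2) ' ' else l.getD p ' ')

lemma pvA_zero (l : List Char) : pvA l 0 = l := by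
  apply List.ext_getElem
  · simp [pvA]
  · intro p h1 h2
    simp [pvA, List.getD_eq_getElem?_getD, List.getElem?_eq_getElem h2]

lemma pvA_length (l : List Char) (t : Nat) : (pvA l t).length = l.length := by
  simp [pvA]

lemma pvMod_cast (k : Nat) : PySem.Int.mod (k : Int) 2 = ((k % 2 : Nat) : Int) := by
  exact_mod_cast PySem.Int.mod_natCast k 2

-- the loop invariant: after the first t iterations the state is (pvA l t, ⌈t/2⌉)
lemma loopA_inv (l : List Char) (t : Nat) (ht : t ≤ l.length) :
    (List.range t).foldl
      (fun (st : List Char × Int) (k : Nat) =>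
        if PySem.Int.mod (k : Int) 2 == 0 then
          (st.1.set k ((PySem.List.pyGet? (pvE l).reverse st.2).getD ' '), st.2 + 1)
        else st)
      (l, 0)
    = (pvA l t, (((t + 1) / 2 : Nat) : Int)) := by
  induction t with
  | zero => simp [pvA_zero]
  | succ t ih =>
      rw [List.range_succ, List.foldl_append, ih (by omega)]
      simp only [List.foldl_cons, List.foldl_nil, pvMod_cast, beq_iff_eq]
      by_cases hpar : t % 2 = 0
      · -- even index: one character is written, j advances
        rw [if_pos (show ((t % 2 : Nat) : Int) = 0 by exact_mod_cast hpar)]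
        have hm : (t + 1) / 2 < (pvE l).reverse.length := by
          rw [List.length_reverse, pvE_length]; omega
        rw [PySem.List.pyGet?_natCast, List.getElem?_eq_getElem hm, Option.getD_some]
        have hlist : (pvA l t).set t (pvE l).reverse[(t + 1) / 2] = pvA l (t + 1) := by
          apply List.ext_getElem
          · simp [pvA]
          · intro p hp hq
            rw [List.getElem_set]
            have hp' : p < l.length := by
              rw [List.length_set, pvA_length] at hp; exact hp
            simp only [pvA, List.getElem_map, List.getElem_range]
            by_cases hpt : t = p
            · subst hpt
              rw [if_pos rfl, if_pos ⟨hpar, Nat.lt_succ_self t⟩]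
              have hq2 : t / 2 < (pvE l).reverse.length := by
                rw [List.length_reverse, pvE_length]; omega
              rw [List.getD_eq_getElem _ ' ' hq2]
              have hidx : (t + 1) / 2 = t / 2 := by omega
              simp only [hidx]
            · rw [if_neg hpt]
              have hiff : (p % 2 = 0 ∧ p < t) ↔ (p % 2 = 0 ∧ p < t + 1) := by
                constructor
                · rintro ⟨h1a, h2a⟩; exact ⟨h1a, by omega⟩
                · rintro ⟨h1a, h2a⟩; exact ⟨h1a, by omega⟩
              simp only [hiff]
        rw [hlist, show (((t + 1) / 2 : Nat) : Int) + 1 = (((t + 1 + 1) / 2 : Nat) : Int)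
          from by omega]
      · -- odd index: nothing happens
        rw [if_neg (by intro hcon; exact hpar (by exact_mod_cast hcon))]
        have hlist : pvA l t = pvA l (t + 1) := by
          simp only [pvA]
          apply List.map_congr_left
          intro p hp
          have hiff : (p % 2 = 0 ∧ p < t) ↔ (p % 2 = 0 ∧ p < t + 1) := by
            constructor
            · rintro ⟨h1a, h2a⟩; exact ⟨h1a, by omega⟩
            · rintro ⟨h1a, h2a⟩; exact ⟨h1a, by omega⟩
          simp only [hiff]
        rw [hlist, show (((t + 1) / 2 : Nat) : Int) = (((t + 1 + 1) / 2 : Nat) : Int)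
          from by omega]

lemma custom_rev_chars (s : String) :
    custom_rev s = String.ofList (pvA s.toList s.toList.length) := by
  unfold custom_rev
  rw [slice_zero_two]
  simp only [Option.getD_some, PySem.List.slice?_none_none_neg_one]
  rw [PySem.List.pyRange_one]
  simp only [sub_zero, Int.toNat_natCast, List.foldl_map, zero_add, Int.toNat_natCast]
  rw [loopA_inv s.toList s.toList.length (le_refl _)]

-- the k-th even-position character, read off pvE
lemma pvE_getElem (l : List Char) (k : Nat) (hk : k < (l.length + 1) / 2) :
    (pvE l)[k]'(by rw [pvE_length]; exact hk) = l.getD (2 * k) ' ' := by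
  simp [pvE]

-- B's closed-form read l[2m-2-p] equals A's reversed-evens read, for even p < n
lemma pvB_even (l : List Char) (p : Nat) (hp : p < l.length) (hpar : p % 2 = 0) :
    (PySem.List.pyGet? l ((2 * ((l.length + 1) / 2) - 2 - p : Nat) : Int)).getD ' '
      = (pvE l).reverse.getD (p / 2) ' ' := by
  have hidx : 2 * ((l.length + 1) / 2) - 2 - p < l.length := by omega
  rw [PySem.List.pyGet?_natCast, List.getElem?_eq_getElem hidx, Option.getD_some]
  have hrev : p / 2 < (pvE l).reverse.length := by
    rw [List.length_reverse, pvE_length]; omega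
  rw [List.getD_eq_getElem _ ' ' hrev, List.getElem_reverse]
  simp only [pvE_length]
  rw [pvE_getElem l ((l.length + 1) / 2 - 1 - p / 2) (by omega)]
  rw [List.getD_eq_getElem _ ' '
    (show 2 * ((l.length + 1) / 2 - 1 - p / 2) < l.length from by omega)]
  simp only [show 2 * ((l.length + 1) / 2 - 1 - p / 2)
      = 2 * ((l.length + 1) / 2) - 2 - p from by omega]

lemma custom_rev_alt_chars (s : String) :
    custom_rev_alt s = String.ofList (pvA s.toList s.toList.length) := by
  simp only [custom_rev_alt]
  rw [PySem.List.pyRange_one]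
  simp only [sub_zero, Int.toNat_natCast, List.map_map]
  congr 1
  simp only [pvA]
  apply List.map_congr_left
  intro p hp
  rw [List.mem_range] at hp
  simp only [Function.comp, zero_add, pvMod_cast, beq_iff_eq, Nat.cast_eq_zero,
    Nat.cast_eq_one]
  by_cases hpar : p % 2 = 0
  · rw [if_pos hpar, if_pos (show p % 2 = 0 ∧ p < s.toList.length from ⟨hpar, hp⟩)]
    have hn1 : 1 ≤ s.toList.length := by omega
    rw [show (if s.toList.length % 2 = 1 then (s.toList.length : Int) - 1
          else (s.toList.length : Int) - 2)
        = ((2 * ((s.toList.length + 1) / 2) - 2 : Nat) : Int) from by split_ifs <;> omega]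
    rw [show ((2 * ((s.toList.length + 1) / 2) - 2 : Nat) : Int) - (p : Int)
        = ((2 * ((s.toList.length + 1) / 2) - 2 - p : Nat) : Int) from by omega]
    exact pvB_even s.toList p hp hpar
  · rw [if_neg hpar,
      if_neg (show ¬(p % 2 = 0 ∧ p < s.toList.length) from fun hcon => hpar hcon.1)]
    rw [PySem.List.pyGet?_natCast, List.getElem?_eq_getElem hp, Option.getD_some,
      List.getD_eq_getElem _ ' ' hp]

-- ===== VERDICT (by name: the statement is the Claim_ definition above) =====
theorem custom_rev_spec : Claim_equal_custom_rev := by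
  intro s _
  unfold Spec_custom_rev
  rw [custom_rev_chars, custom_rev_alt_chars]
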